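-- pv_equiv track=rewrite | github.com/podobar/p2-art2 | main.py | mix_data
-- ===== SOURCE A (Python) =====
-- def mix_data(data, n_class, samples_per_class, have_to_mix):
--     if not have_to_mix:
--         return data
--     data_reordered = list()
--     for i in range(samples_per_class):
--         for j in range(n_class):
--             data_reordered.append(data[i + j * samples_per_class])
--
--     return data_reordered
-- ===== SOURCE B (Python) =====
-- def mix_data(data, n_class, samples_per_class, have_to_mix):
--     if not have_to_mix:
--         return data
--     chunks = [data[j * samples_per_class:(j + 1) * samples_per_class]
--               for j in range(n_class)]
--     return [x for row in zip(*chunks) for x in row]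
-- ===== Notes on version B (the rewrite author's own statement) =====
-- stated objective: idiomatic
-- what changed: Replaces the nested index-arithmetic loops with slicing the data into per-class blocks and transposing them via zip(*chunks), flattening the rows.
-- outside the precondition, e.g. on mix_data([1, 2], 1, -1, True): A returns [], B returns [1]
import Mathlib
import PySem

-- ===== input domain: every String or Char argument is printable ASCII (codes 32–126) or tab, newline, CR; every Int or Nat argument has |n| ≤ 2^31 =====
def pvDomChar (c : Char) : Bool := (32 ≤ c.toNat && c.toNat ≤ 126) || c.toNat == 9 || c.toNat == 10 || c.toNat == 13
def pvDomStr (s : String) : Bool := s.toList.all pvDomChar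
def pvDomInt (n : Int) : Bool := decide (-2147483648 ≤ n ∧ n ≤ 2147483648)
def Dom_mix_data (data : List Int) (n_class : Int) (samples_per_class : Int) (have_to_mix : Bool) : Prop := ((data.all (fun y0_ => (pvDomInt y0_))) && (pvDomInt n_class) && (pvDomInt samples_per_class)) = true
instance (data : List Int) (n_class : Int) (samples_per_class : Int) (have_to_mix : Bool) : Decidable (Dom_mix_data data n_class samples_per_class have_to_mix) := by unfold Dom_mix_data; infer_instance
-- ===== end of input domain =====

-- B replaces A's nested index-arithmetic loops by slicing the data into per-class blocks and
-- transposing them (zip-style), flattening the rows; same cost, more idiomatic.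

-- ===== PORT A =====
def mix_data (data : List Int) (n_class : Int) (samples_per_class : Int) (have_to_mix : Bool) : List Int :=
  if !have_to_mix then data
  else
    (PySem.List.pyRange 0 samples_per_class 1).foldl (fun acc i =>
      (PySem.List.pyRange 0 n_class 1).foldl (fun acc2 j =>
        acc2 ++ [PySem.List.pyGetD data (i + j * samples_per_class) 0]) acc) []

-- ===== PORT B =====
-- zip(*chunks) is ported as rows indexed up to the minimum chunk length (Python zip's contract).
def mix_data_alt (data : List Int) (n_class : Int) (samples_per_class : Int) (have_to_mix : Bool) : List Int :=
  if !have_to_mix then data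
  else
    let chunks := (PySem.List.pyRange 0 n_class 1).map (fun j =>
      PySem.List.slice data (some (j * samples_per_class)) (some ((j + 1) * samples_per_class)))
    let m := ((chunks.map List.length).min?).getD 0
    ((List.range m).map (fun i => chunks.map (fun c => c.getD i 0))).flatten

-- ===== PRECONDITION & SPEC =====
-- Pre_ excludes (a) inputs where A raises IndexError (mixing requested with too little data),
-- and (b) a negative samples_per_class with a positive n_class — a meaningless count outside the
-- task's natural domain, on which A's empty range() accidentally returns [].
def Pre_mix_data (data : List Int) (n_class : Int) (samples_per_class : Int) (have_to_mix : Bool) : Prop :=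
  have_to_mix = false ∨ n_class ≤ 0 ∨
    (0 ≤ samples_per_class ∧ n_class * samples_per_class ≤ (data.length : Int))
instance (data : List Int) (n_class : Int) (samples_per_class : Int) (have_to_mix : Bool) : Decidable (Pre_mix_data data n_class samples_per_class have_to_mix) := by unfold Pre_mix_data; infer_instance
def pvWitness_mix_data : List Int × Int × Int × Bool := ([1, 2, 3, 4, 5, 6], 2, 3, true)

def Spec_mix_data (data : List Int) (n_class : Int) (samples_per_class : Int) (have_to_mix : Bool) (out : List Int) : Prop := out = mix_data_alt data n_class samples_per_class have_to_mix
instance (data : List Int) (n_class : Int) (samples_per_class : Int) (have_to_mix : Bool) (out : List Int) : Decidable (Spec_mix_data data n_class samples_per_class have_to_mix out) := by unfold Spec_mix_data; infer_instance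

-- ===== CLAIM (what is proved, stated in full; the proofs are below) =====
def Claim_equal_mix_data : Prop := ∀ (data : List Int) (n_class : Int) (samples_per_class : Int) (have_to_mix : Bool), Dom_mix_data data n_class samples_per_class have_to_mix → Pre_mix_data data n_class samples_per_class have_to_mix → Spec_mix_data data n_class samples_per_class have_to_mix (mix_data data n_class samples_per_class have_to_mix)

-- ===== LEMMAS AND PROOFS =====

-- Each per-class block has exactly samples_per_class elements when the data is long enough.
theorem chunk_length (data : List Int) (n s j : Int) (hs : 0 ≤ s) (hj : 0 ≤ j) (hjn : j < n)
    (hlen : n * s ≤ (data.length : Int)) :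
    (PySem.List.slice data (some (j * s)) (some ((j + 1) * s))).length = s.toNat := by
  have hjs : (0:Int) ≤ j * s := mul_nonneg hj hs
  have hj1 : (j + 1) * s = j * s + s := by ring
  have hns : j * s + s ≤ n * s := by nlinarith
  rw [PySem.List.slice_toNat data hjs (by omega)]
  simp only [List.length_take, List.length_drop]
  omega

-- The i-th element of the j-th block is data[i + j*s].
theorem chunk_get (data : List Int) (n s j : Int) (i : Nat) (hs : 0 ≤ s) (hj : 0 ≤ j) (hjn : j < n)
    (hlen : n * s ≤ (data.length : Int)) (hi : (i : Int) < s) :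
    (PySem.List.slice data (some (j * s)) (some ((j + 1) * s))).getD i 0
      = PySem.List.pyGetD data ((i : Int) + j * s) 0 := by
  have hjs : (0:Int) ≤ j * s := mul_nonneg hj hs
  have hj1 : (j + 1) * s = j * s + s := by ring
  have hns : j * s + s ≤ n * s := by nlinarith
  have hidx0 : (0:Int) ≤ (i : Int) + j * s := add_nonneg (Int.natCast_nonneg i) hjs
  have hidx : (i : Int) + j * s < (data.length : Int) := by omega
  rw [PySem.List.slice_toNat data hjs (by omega)]
  have ht : i < ((j + 1) * s).toNat - (j * s).toNat := by omega
  have hlt : (j * s).toNat + i < data.length := by omega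
  rw [List.getD_eq_getElem?_getD, List.getElem?_take_of_lt ht, List.getElem?_drop,
    List.getElem?_eq_getElem hlt,
    PySem.List.pyGetD_eq_getElem data 0 hidx0 hidx]
  simp only [Option.getD_some]
  congr 1
  omega

-- The main case: mixing requested, positive class count, enough data.
theorem mix_data_main_case (data : List Int) (n s : Int) (hn : 0 < n) (hs : 0 ≤ s)
    (hlen : n * s ≤ (data.length : Int)) :
    mix_data data n s true = mix_data_alt data n s true := by
  unfold mix_data mix_data_alt
  simp only [Bool.not_true, Bool.false_eq_true, if_false]
  -- A as a flatten of per-i rows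
  have hA : (PySem.List.pyRange 0 s 1).foldl (fun acc i =>
      (PySem.List.pyRange 0 n 1).foldl (fun acc2 j =>
        acc2 ++ [PySem.List.pyGetD data (i + j * s) 0]) acc) []
      = ((List.range s.toNat).map (fun i : Nat =>
          (PySem.List.pyRange 0 n 1).map (fun j => PySem.List.pyGetD data ((i : Int) + j * s) 0))).flatten := by
    have hstep : (PySem.List.pyRange 0 s 1).foldl (fun acc i =>
        (PySem.List.pyRange 0 n 1).foldl (fun acc2 j =>
          acc2 ++ [PySem.List.pyGetD data (i + j * s) 0]) acc) []
        = [] ++ (PySem.List.pyRange 0 s 1).flatMap (fun i =>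
            (PySem.List.pyRange 0 n 1).map (fun j => PySem.List.pyGetD data (i + j * s) 0)) := by
      rw [← PySem.List.foldl_append_eq_flatMap]
      apply List.foldl_ext
      intro acc i _
      exact PySem.List.foldl_append_singleton_eq_map _ _ _
    rw [hstep, List.nil_append, PySem.List.pyRange_one 0 s, List.flatMap_map, List.flatMap_def]
    simp only [zero_add, sub_zero]
  rw [hA]
  -- every chunk has length s.toNat, so the zip bound m is s.toNat
  have hlens : ((PySem.List.pyRange 0 n 1).map (fun j =>
      PySem.List.slice data (some (j * s)) (some ((j + 1) * s)))).map List.length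
      = List.replicate (PySem.List.pyRange 0 n 1).length s.toNat := by
    rw [List.map_map, List.eq_replicate_iff]
    refine ⟨by simp, ?_⟩
    intro b hb
    simp only [List.mem_map, Function.comp] at hb
    obtain ⟨j, hj, rfl⟩ := hb
    rw [PySem.List.mem_pyRange_one] at hj
    exact chunk_length data n s j hs hj.1 hj.2 hlen
  rw [hlens, List.min?_replicate_of_pos
    (by rw [PySem.List.length_pyRange_one]; omega), Option.getD_some]
  -- rows are equal elementwise
  congr 1
  apply List.map_congr_left
  intro i hi
  rw [List.mem_range] at hi
  rw [List.map_map]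
  apply List.map_congr_left
  intro j hj
  rw [PySem.List.mem_pyRange_one] at hj
  exact (chunk_get data n s j i hs hj.1 hj.2 hlen (by omega)).symm

-- ===== VERDICT (by name: the statement is the Claim_ definition above) =====
theorem mix_data_spec : Claim_equal_mix_data := by
  intro data n s htm _ hpre
  unfold Spec_mix_data
  cases htm with
  | false => simp [mix_data, mix_data_alt]
  | true =>
    rcases hpre with h | h | ⟨hs, hlen⟩
    · exact absurd h (by simp)
    · simp [mix_data, mix_data_alt, PySem.List.pyRange_one_eq_nil h, List.foldl_fixed]
    · by_cases hn : 0 < n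
      · exact mix_data_main_case data n s hn hs hlen
      · simp [mix_data, mix_data_alt, PySem.List.pyRange_one_eq_nil (by omega : n ≤ 0),
          List.foldl_fixed]
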